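-- pv_equiv track=rewrite | github.com/Klaus-in-Tech/maharishi-test-questions | find_porcupine_number.py | find_porcupine_number
-- ===== SOURCE A (Python) =====
-- import math
--
-- def is_prime(n):
--     if n == 2:
--         return True
--     if n<2:
--         return False
--     if n%2 == 0:
--         return False
--
--     for i in range(3,math.isqrt(n),2):
--         if n%i == 0:
--             return False
--     return True
--
-- def find_porcupine_number(n):
--     current = n + 1
--     while True:
--
--         if is_prime(current) and current%10 ==9:
--             next_num = current + 1
--             while True:
--                 if is_prime(next_num):
--                     if str(next_num).endswith('9'):
--                         return current
--                     else:
--                         break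
--                 next_num+=1
--         current+=1
-- ===== SOURCE B (Python) =====
-- import math
--
-- def is_prime(n):
--     if n == 2:
--         return True
--     if n<2:
--         return False
--     if n%2 == 0:
--         return False
--
--     for i in range(3,math.isqrt(n),2):
--         if n%i == 0:
--             return False
--     return True
--
-- def find_porcupine_number(n):
--     # single pass: remember a prime ending in 9 until the next prime resolves it
--     pending = None
--     m = n + 1
--     while True:
--         if is_prime(m):
--             if pending is not None:
--                 if m % 10 == 9:
--                     return pending
--                 pending = None
--             elif m % 10 == 9:
--                 pending = m
--         m += 1
-- ===== Notes on version B (the rewrite author's own statement) =====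
-- stated objective: alternative
-- what changed: Replaced A's nested loops (outer candidate scan plus an inner successor scan that the outer loop then re-traverses) by a single forward pass that keeps a 'pending' prime-ending-in-9 candidate and resolves it at the next prime, so every integer is primality-tested at most once.
import Mathlib
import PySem

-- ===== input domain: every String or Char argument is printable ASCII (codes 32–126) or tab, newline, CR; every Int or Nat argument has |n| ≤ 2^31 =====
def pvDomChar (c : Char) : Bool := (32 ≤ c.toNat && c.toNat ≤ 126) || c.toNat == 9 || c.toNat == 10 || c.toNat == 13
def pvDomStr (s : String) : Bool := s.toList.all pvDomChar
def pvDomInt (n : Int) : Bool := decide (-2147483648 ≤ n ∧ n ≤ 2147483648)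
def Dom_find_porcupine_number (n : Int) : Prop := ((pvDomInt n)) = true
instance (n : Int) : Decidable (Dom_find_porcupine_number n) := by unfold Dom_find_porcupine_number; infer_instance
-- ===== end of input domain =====

-- B replaces A's nested candidate/successor loops by one pass over the integers with a
-- `pending` candidate state (objective: alternative decomposition, no re-scanning).
-- Both Pythons loop forever in principle; the ports bound the scan by a fuel far beyond
-- any distance to the answer on the stated domain (the equivalence holds for every fuel).

-- ===== PORT A =====
-- shared helper: literal transliteration of is_prime (both sources contain the same function)
def pvIsPrime (n : Int) : Bool :=
  if n == 2 then true
  else if n < 2 then false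
  else if PySem.Int.mod n 2 == 0 then false
  else (PySem.List.pyRange 3 ((Nat.sqrt n.toNat : Nat) : Int) 2).all
         (fun i => !(PySem.Int.mod n i == 0))

-- inner `while True` of A: some true = next prime ends in '9' (return current),
-- some false = break, none = fuel exhausted
def pvInner (next_num : Int) : Nat → Option Bool
  | 0 => none
  | f + 1 =>
    if pvIsPrime next_num then
      (if PySem.Str.endswith (PySem.Int.toStr next_num) "9" then some true else some false)
    else pvInner (next_num + 1) f

-- outer `while True` of A
def pvOuter (current : Int) : Nat → Option Int
  | 0 => none
  | f + 1 =>
    if pvIsPrime current && (PySem.Int.mod current 10 == 9) then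
      match pvInner (current + 1) f with
      | some true => some current
      | some false => pvOuter (current + 1) f
      | none => none
    else pvOuter (current + 1) f

def find_porcupine_number (n : Int) : Int := (pvOuter (n + 1) 8589934592).getD 0

-- ===== PORT B =====
-- single scan with a pending candidate (Source B)
def pvScan (m : Int) (pending : Option Int) : Nat → Option Int
  | 0 => none
  | f + 1 =>
    if pvIsPrime m then
      match pending with
      | some p =>
        if PySem.Int.mod m 10 == 9 then some p else pvScan (m + 1) none f
      | none =>
        if PySem.Int.mod m 10 == 9 then pvScan (m + 1) (some m) f
        else pvScan (m + 1) none f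
    else pvScan (m + 1) pending f

def find_porcupine_number_alt (n : Int) : Int := (pvScan (n + 1) none 8589934592).getD 0

-- ===== PRECONDITION & SPEC =====
def Spec_find_porcupine_number (n : Int) (out : Int) : Prop := out = find_porcupine_number_alt n
instance (n : Int) (out : Int) : Decidable (Spec_find_porcupine_number n out) := by unfold Spec_find_porcupine_number; infer_instance

-- ===== CLAIM (what is proved, stated in full; the proofs are below) =====
def Claim_equal_find_porcupine_number : Prop := ∀ (n : Int), Dom_find_porcupine_number n → Spec_find_porcupine_number n (find_porcupine_number n)

-- ===== LEMMAS AND PROOFS =====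

-- Nat.toDigitsCore only prepends to its accumulator
lemma pv_toDigitsCore_append (f : Nat) : ∀ (n : Nat) (l : List Char),
    ∃ p, Nat.toDigitsCore 10 f n l = p ++ l := by
  induction f with
  | zero => intro n l; exact ⟨[], rfl⟩
  | succ f ih =>
    intro n l
    simp only [Nat.toDigitsCore]
    split
    · exact ⟨[Nat.digitChar (n % 10)], rfl⟩
    · obtain ⟨p, hp⟩ := ih (n / 10) (Nat.digitChar (n % 10) :: l)
      exact ⟨p ++ [Nat.digitChar (n % 10)], by simpa using hp⟩

-- str(m) ends with the character of m % 10
lemma pv_toDigits_last (m : Nat) :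
    ∃ p, Nat.toDigits 10 m = p ++ [Nat.digitChar (m % 10)] := by
  simp only [Nat.toDigits, Nat.toDigitsCore]
  split
  · exact ⟨[], rfl⟩
  · obtain ⟨p, hp⟩ := pv_toDigitsCore_append m (m / 10) [Nat.digitChar (m % 10)]
    exact ⟨p, hp⟩

lemma pv_endswith_append_singleton (p : List Char) (c d : Char) :
    PySem.Chars.endswith (p ++ [c]) [d] = (d == c) := by
  simp [PySem.Chars.endswith, List.isSuffixOf, List.isPrefixOf]

lemma pv_endswith_nine_nat (m : Nat) :
    PySem.Chars.endswith (Nat.toDigits 10 m) ['9'] = (m % 10 == 9) := by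
  obtain ⟨p, hp⟩ := pv_toDigits_last m
  rw [hp, pv_endswith_append_singleton]
  have h10 : m % 10 < 10 := Nat.mod_lt _ (by norm_num)
  interval_cases h : m % 10 <;> simp [Nat.digitChar]

-- the str(...).endswith('9') test of A agrees with the m % 10 == 9 test of B on positives
lemma pv_endswith_nine (c : Int) (hc : 0 ≤ c) :
    PySem.Str.endswith (PySem.Int.toStr c) "9" = (PySem.Int.mod c 10 == 9) := by
  have hcast : c = ((c.toNat : Nat) : Int) := by omega
  rw [PySem.Str.endswith_eq, PySem.Int.toList_toStr]
  have h1 : PySem.Int.toChars c = Nat.toDigits 10 c.toNat := by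
    simp [PySem.Int.toChars, not_lt.mpr hc]
  have h2 : ("9" : String).toList = ['9'] := rfl
  rw [h1, h2, pv_endswith_nine_nat]
  have hm : PySem.Int.mod c 10 = ((c.toNat % 10 : Nat) : Int) := by
    conv_lhs => rw [hcast]
    exact_mod_cast PySem.Int.mod_natCast c.toNat 10
  rw [hm]
  rw [Bool.eq_iff_iff]
  simp only [beq_iff_eq]
  omega

lemma pv_isPrime_pos (c : Int) (h : pvIsPrime c = true) : 0 ≤ c := by
  by_contra hneg
  simp only [pvIsPrime] at h
  rw [if_neg (by simp only [beq_iff_eq]; omega : ¬ (c == 2) = true),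
      if_pos (by omega : c < 2)] at h
  exact absurd h (by simp)

-- the main invariant: B's scan with an armed pending candidate computes exactly what
-- A's inner loop decides, and with no pending candidate it equals A's outer loop
lemma pv_scan_eq (f : Nat) :
    (∀ c, pvOuter c f = pvScan c none f) ∧
    (∀ c p, pvScan c (some p) f =
      match pvInner c f with
      | none => none
      | some true => some p
      | some false => pvOuter c f) := by
  induction f with
  | zero => exact ⟨fun _ => rfl, fun _ _ => rfl⟩
  | succ f ih =>
    obtain ⟨ih1, ih2⟩ := ih
    have hmod : ∀ x : Int, PySem.Int.mod x 10 = x % 10 :=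
      fun x => PySem.Int.mod_eq_emod_of_pos (by norm_num)
    have houter : ∀ c, ¬ ((pvIsPrime c && (PySem.Int.mod c 10 == 9)) = true) →
        pvOuter c (f + 1) = pvOuter (c + 1) f := by
      intro c hc
      simp only [pvOuter]
      rw [if_neg hc]
    constructor
    · intro c
      by_cases hp : pvIsPrime c = true
      · by_cases h9 : c % 10 = 9
        · have hA : pvOuter c (f + 1) = match pvInner (c + 1) f with
              | some true => some c | some false => pvOuter (c + 1) f | none => none := by
            simp only [pvOuter]
            rw [if_pos (by simp [hp, h9])]
          have hB : pvScan c none (f + 1) = pvScan (c + 1) (some c) f := by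
            simp [pvScan, hp, h9]
          rw [hA, hB, ih2]
          rcases pvInner (c + 1) f with _ | b
          · rfl
          · cases b <;> rfl
        · rw [houter c (by simp [hp, h9]), ih1]
          simp [pvScan, hp, h9]
      · rw [houter c (by simp [hp]), ih1]
        simp [pvScan, hp]
    · intro c p
      by_cases hp : pvIsPrime c = true
      · have h9 := pv_endswith_nine c (pv_isPrime_pos c hp)
        rw [PySem.Str.endswith_eq, PySem.Int.toList_toStr,
            show ("9" : String).toList = ['9'] from rfl, hmod] at h9
        by_cases hm : c % 10 = 9
        · simp [pvScan, pvInner, hp, h9, hm]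
        · have hL : pvScan c (some p) (f + 1) = pvScan (c + 1) none f := by
            simp [pvScan, hp, hm]
          have hR : pvInner c (f + 1) = some false := by
            simp [pvInner, hp, h9, hm]
          rw [hL, hR]
          show pvScan (c + 1) none f = pvOuter c (f + 1)
          rw [houter c (by simp [hp, hm]), ih1]
      · have hI : pvInner c (f + 1) = pvInner (c + 1) f := by
          simp [pvInner, hp]
        have hS : pvScan c (some p) (f + 1) = pvScan (c + 1) (some p) f := by
          simp [pvScan, hp]
        rw [hS, hI, ih2]
        rcases pvInner (c + 1) f with _ | b
        · rfl
        · cases b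
          · exact (houter c (by simp [hp])).symm
          · rfl

-- ===== VERDICT (by name: the statement is the Claim_ definition above) =====
theorem find_porcupine_number_spec : Claim_equal_find_porcupine_number := by
  intro n _
  unfold Spec_find_porcupine_number find_porcupine_number find_porcupine_number_alt
  rw [(pv_scan_eq 8589934592).1 (n + 1)]
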